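-- pv_equiv track=rewrite | github.com/PrincetonUniversity/fusionrate | fusionrate/reactionnames.py | _generate_single_branch_list
-- ===== SOURCE A (Python) =====
-- def _generate_single_branch_list(reactions_lookup: dict):
--     """Get reactions that have only have one possible set of products"""
--     all_reactions = list(reactions_lookup.keys())
--     all_reactants = [r[0] for r in all_reactions]
--     with_unique_reactants = {}
--     for r in all_reactions:
--         reactants, products = r
--         if all_reactants.count(reactants) == 1:
--             with_unique_reactants[reactants] = reactions_lookup[r]
--     return with_unique_reactants
-- ===== SOURCE B (Python) =====
-- def _generate_single_branch_list(reactions_lookup: dict):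
--     """Get reactions that have only have one possible set of products"""
--     s = sorted(r[0] for r in reactions_lookup)
--     dups = {b for a, b in zip(s, s[1:]) if a == b}
--     return {r[0]: v for r, v in reactions_lookup.items() if r[0] not in dups}
-- ===== Notes on version B (the rewrite author's own statement) =====
-- stated objective: faster
-- what changed: A rescans the whole reactants list with .count for every key (quadratic); B instead sorts the reactants once, detects duplicated reactants by comparing adjacent elements of the sorted list (zip(s, s[1:])), and keeps the items whose reactants is not in that duplicate set.
import Mathlib
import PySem

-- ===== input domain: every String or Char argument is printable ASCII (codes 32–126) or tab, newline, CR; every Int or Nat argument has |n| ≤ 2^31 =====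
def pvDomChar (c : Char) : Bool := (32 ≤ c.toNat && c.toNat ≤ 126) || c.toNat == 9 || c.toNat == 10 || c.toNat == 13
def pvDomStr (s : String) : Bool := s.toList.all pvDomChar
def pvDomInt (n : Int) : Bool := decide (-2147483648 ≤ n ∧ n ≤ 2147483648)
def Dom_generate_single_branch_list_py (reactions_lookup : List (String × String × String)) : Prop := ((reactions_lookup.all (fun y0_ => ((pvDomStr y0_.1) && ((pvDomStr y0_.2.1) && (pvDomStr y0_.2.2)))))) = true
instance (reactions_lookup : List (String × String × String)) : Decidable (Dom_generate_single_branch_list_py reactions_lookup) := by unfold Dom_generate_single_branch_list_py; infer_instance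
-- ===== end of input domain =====

-- B replaces A's quadratic per-key `.count` rescans by sort + adjacent-duplicate scan (objective: faster).


-- ===== PORT A =====
def generate_single_branch_list_py (reactions_lookup : List (String × String × String)) : List (String × String) :=
  -- the dict argument (keys = (reactants, products) pairs) as a PySem.Dict
  let d : PySem.Dict (String × String) String :=
    PySem.Dict.ofList (reactions_lookup.map (fun t => ((t.1, t.2.1), t.2.2)))
  let all_reactions := d.keys
  let all_reactants := all_reactions.map (fun r => r.1)
  -- `reactions_lookup[r]`: r is a key of the dict, so lookup always succeeds; getD is exact here
  let with_unique_reactants :=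
    all_reactions.foldl
      (fun (w : PySem.Dict String String) r =>
        if PySem.List.count all_reactants r.1 == 1 then w.insert r.1 (d.getD r "") else w)
      PySem.Dict.empty
  with_unique_reactants.items

-- ===== PORT B =====
def generate_single_branch_list_py_alt (reactions_lookup : List (String × String × String)) : List (String × String) :=
  let d : PySem.Dict (String × String) String :=
    PySem.Dict.ofList (reactions_lookup.map (fun t => ((t.1, t.2.1), t.2.2)))
  -- s = sorted(r[0] for r in reactions_lookup)
  let s := PySem.List.sorted (d.keys.map (fun r => r.1)) (fun x => x) false
  -- dups = {b for a, b in zip(s, s[1:]) if a == b}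
  let dups : PySem.Set String :=
    PySem.Set.ofList (((List.zip s (PySem.List.slice s (some 1) none)).filter
      (fun p => p.1 == p.2)).map (fun p => p.2))
  -- {r[0]: v for r, v in reactions_lookup.items() if r[0] not in dups}
  (d.items.foldl
    (fun (w : PySem.Dict String String) p =>
      if !(PySem.Set.contains dups p.1.1) then w.insert p.1.1 p.2 else w)
    PySem.Dict.empty).items

-- ===== PRECONDITION & SPEC =====
def Spec_generate_single_branch_list_py (reactions_lookup : List (String × String × String)) (out : List (String × String)) : Prop := out = generate_single_branch_list_py_alt reactions_lookup
instance (reactions_lookup : List (String × String × String)) (out : List (String × String)) : Decidable (Spec_generate_single_branch_list_py reactions_lookup out) := by unfold Spec_generate_single_branch_list_py; infer_instance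

-- ===== CLAIM (what is proved, stated in full; the proofs are below) =====
def Claim_equal_generate_single_branch_list_py : Prop := ∀ (reactions_lookup : List (String × String × String)), Dom_generate_single_branch_list_py reactions_lookup → Spec_generate_single_branch_list_py reactions_lookup (generate_single_branch_list_py reactions_lookup)

-- ===== LEMMAS AND PROOFS =====

-- In a ≤-sorted list, x is the second component of an equal adjacent pair iff it occurs at least twice.
theorem mem_adj_dups_iff_one_lt_count (l : List String) (hl : l.Pairwise (· ≤ ·)) (x : String) :
    (x ∈ ((List.zip l l.tail).filter (fun p => p.1 == p.2)).map (fun p => p.2)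
      ↔ 1 < l.count x) := by
  induction l with
  | nil => simp
  | cons a t ih =>
    match t with
    | [] =>
      have h1 : List.count x [a] ≤ 1 := List.count_le_length ..
      simp
      omega
    | b :: t' =>
      have hab : a ≤ b := (List.pairwise_cons.mp hl).1 b (List.mem_cons_self ..)
      have ht : (b :: t').Pairwise (· ≤ ·) := (List.pairwise_cons.mp hl).2
      have iht := ih ht
      constructor
      · intro hmem
        simp only [List.tail_cons, List.zip_cons_cons, List.filter_cons] at hmem
        by_cases hab2 : a = b
        · rw [if_pos (by simpa using hab2)] at hmem
          simp only [List.map_cons, List.mem_cons] at hmem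
          rcases hmem with hx | hx
          · subst hx
            subst hab2
            simp
          · have h2 := iht.mp hx
            exact lt_of_lt_of_le h2 ((List.sublist_cons_self a _).count_le x)
        · rw [if_neg (by simpa using hab2)] at hmem
          have h2 := iht.mp hmem
          exact lt_of_lt_of_le h2 ((List.sublist_cons_self a _).count_le x)
      · intro hcnt
        by_cases h2 : 1 < (b :: t').count x
        · have hx := iht.mpr h2
          simp only [List.tail_cons, List.zip_cons_cons, List.filter_cons]
          by_cases hab2 : a = b
          · rw [if_pos (by simpa using hab2)]
            simp only [List.map_cons, List.mem_cons]
            exact Or.inr hx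
          · rw [if_neg (by simpa using hab2)]
            exact hx
        · -- then a = x and x occurs in b :: t'; sortedness forces b = x
          have hax : a = x := by
            by_contra hax
            rw [List.count_cons, if_neg (by simp [hax])] at hcnt
            omega
          have hmem : x ∈ b :: t' := by
            rw [List.count_cons, if_pos (by simp [hax])] at hcnt
            have : 0 < (b :: t').count x := by omega
            exact List.count_pos_iff.mp this
          have hbx : b = x := by
            rcases List.mem_cons.mp hmem with h | h
            · exact h.symm
            · have hbx' : b ≤ x := (List.pairwise_cons.mp ht).1 x h
              have hxb : x ≤ b := hax ▸ hab
              exact le_antisymm hbx' hxb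
          simp only [List.tail_cons, List.zip_cons_cons, List.filter_cons]
          rw [if_pos (by simp [hax, hbx])]
          simp [hbx]

theorem main_eq (ks : List (String × String)) (hnd : ks.Nodup)
    (d : PySem.Dict (String × String) String) (hdk : d.keys = ks) :
    (ks.foldl
      (fun (w : PySem.Dict String String) r =>
        if PySem.List.count (ks.map (fun r => r.1)) r.1 == 1 then w.insert r.1 (d.getD r "") else w)
      PySem.Dict.empty).items =
    (d.items.foldl
      (fun (w : PySem.Dict String String) p =>
        if !(PySem.Set.contains (PySem.Set.ofList (((List.zip (PySem.List.sorted (ks.map (fun r => r.1)) (fun x => x) false)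
              ((PySem.List.sorted (ks.map (fun r => r.1)) (fun x => x) false).tail)).filter
              (fun p => p.1 == p.2)).map (fun p => p.2))) p.1.1)
        then w.insert p.1.1 p.2 else w)
      PySem.Dict.empty).items := by
  set rs := ks.map (fun r => r.1) with hrs
  set s := PySem.List.sorted rs (fun x => x) false with hs
  have hperm : s.Perm rs := PySem.List.sorted_perm rs (fun x => x) false
  have hpw : s.Pairwise (· ≤ ·) := by
    have := PySem.List.sorted_pairwise rs (fun x => x)
    simpa using this
  have hcount : ∀ x, s.count x = rs.count x := fun x => hperm.count_eq x
  -- the duplicate test agrees with `count == 1` on elements of rs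
  have hdup : ∀ x ∈ rs,
      (!(PySem.Set.contains (PySem.Set.ofList (((List.zip s s.tail).filter (fun p => p.1 == p.2)).map (fun p => p.2)))
          x)) = (rs.count x == 1) := by
    intro x hx
    have h1 : 1 ≤ rs.count x := List.count_pos_iff.mpr hx
    have hiff := mem_adj_dups_iff_one_lt_count s hpw x
    rw [hcount x] at hiff
    by_cases hlt : 1 < rs.count x
    · have hm := hiff.mpr hlt
      have : (PySem.Set.contains (PySem.Set.ofList (((List.zip s s.tail).filter (fun p => p.1 == p.2)).map (fun p => p.2)))
          x) = true :=
        (PySem.Set.contains_iff _ _).mpr ((PySem.Set.mem_ofList ..).mpr hm)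
      rw [this]
      simp
      omega
    · have hm : x ∉ ((List.zip s s.tail).filter (fun p => p.1 == p.2)).map (fun p => p.2) := by
        intro hmem; exact hlt (hiff.mp hmem)
      have : (PySem.Set.contains (PySem.Set.ofList (((List.zip s s.tail).filter (fun p => p.1 == p.2)).map (fun p => p.2)))
          x) = false := by
        rw [Bool.eq_false_iff]
        intro hc
        exact hm ((PySem.Set.mem_ofList ..).mp ((PySem.Set.contains_iff _ _).mp hc))
      rw [this]
      simp
      omega
  -- common target: the filtered map
  have hsubnd : (ks.filter (fun r : String × String => List.count r.1 rs == 1)).map (fun r => r.1) |>.Nodup := by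
    rw [List.nodup_iff_count_le_one]
    intro a
    by_cases hmem : a ∈ (ks.filter (fun r : String × String => List.count r.1 rs == 1)).map (fun r => r.1)
    · obtain ⟨r, hrf, hra⟩ := List.mem_map.mp hmem
      have hc1 : rs.count r.1 = 1 := by
        have := (List.mem_filter.mp hrf).2
        simpa using this
      have hsub : ((ks.filter (fun r : String × String => List.count r.1 rs == 1)).map (fun r => r.1)).Sublist rs :=
        List.filter_sublist.map _
      have hle := hsub.count_le a
      rw [← hra] at *
      omega
    · rw [List.count_eq_zero_of_not_mem hmem]; omega
  -- ===== A side =====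
  have hA : (ks.foldl
      (fun (w : PySem.Dict String String) r =>
        if PySem.List.count rs r.1 == 1 then w.insert r.1 (d.getD r "") else w)
      PySem.Dict.empty)
      = (ks.filter (fun r : String × String => PySem.List.count rs r.1 == 1)).foldl
          (fun (w : PySem.Dict String String) r => w.insert r.1 (d.getD r "")) PySem.Dict.empty :=
    PySem.List.foldl_if_eq_foldl_filter _ _ _ _
  have hAcnt : (ks.filter (fun r : String × String => PySem.List.count rs r.1 == 1))
      = (ks.filter (fun r : String × String => List.count r.1 rs == 1)) := by
    apply List.filter_congr
    intro r _
    rw [PySem.List.count_eq]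
  rw [hA, hAcnt,
    PySem.Dict.items_foldl_insert_fresh _ _ _ _ (fun a _ => PySem.Dict.contains_empty _) hsubnd]
  -- ===== B side =====
  have hitems : d.items = ks.map (fun k => (k, d.getD k "")) := by
    rw [PySem.Dict.items_eq_map_keys d (hdk ▸ hnd) ""]
    rw [hdk]
  rw [hitems]
  rw [PySem.List.foldl_if_eq_foldl_filter]
  rw [List.filter_map]
  have hpred : (ks.filter ((fun (p : (String × String) × String) =>
        !(PySem.Set.contains (PySem.Set.ofList (((List.zip s s.tail).filter (fun p => p.1 == p.2)).map (fun p => p.2)))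
            p.1.1)) ∘ (fun k => (k, d.getD k ""))))
      = ks.filter (fun r : String × String => List.count r.1 rs == 1) := by
    apply List.filter_congr
    intro r hr
    have hr1 : r.1 ∈ rs := List.mem_map.mpr ⟨r, hr, rfl⟩
    simpa using hdup r.1 hr1
  rw [hpred, List.foldl_map,
    PySem.Dict.items_foldl_insert_fresh _ _ _ _ (fun a _ => PySem.Dict.contains_empty _) hsubnd]

-- ===== VERDICT (by name: the statement is the Claim_ definition above) =====
theorem generate_single_branch_list_py_spec : Claim_equal_generate_single_branch_list_py := by
  intro rl _
  unfold Spec_generate_single_branch_list_py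
  simp only [generate_single_branch_list_py, generate_single_branch_list_py_alt,
    PySem.List.slice_from_one]
  exact main_eq (PySem.Dict.ofList (rl.map (fun t => ((t.1, t.2.1), t.2.2)))).keys
    (PySem.Dict.nodup_keys_ofList _)
    (PySem.Dict.ofList (rl.map (fun t => ((t.1, t.2.1), t.2.2)))) rfl
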